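-- pv_equiv track=rewrite | github.com/guilhermebaos/HackerRank | Algorithms/Bit Manipulation/Medium/003_The_Great_XOR.py | theGreatXor
-- ===== SOURCE A (Python) =====
-- def theGreatXor(x):
--     x_bin = list(bin(x)[2:])
--     x_len = len(x_bin)
--
--     total = 0
--     for index, bit in enumerate(x_bin):
--         if bit == '0':
--             position = x_len - index - 1
--
--             # If q has a one in this position, the result will automatically be bigger than x, no mater the rest of q
--             total += 2 ** position
--
--     return total
-- ===== SOURCE B (Python) =====
-- def theGreatXor(x):
--     # closed form: complement of x within its bit-length field
--     return 2 ** (len(bin(x)) - 2) - 1 - x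
-- ===== Notes on version B (the rewrite author's own statement) =====
-- stated objective: simpler
-- what changed: Replaces the per-bit loop over the binary digit string with the closed form 2**(len(bin(x))-2) - 1 - x, the complement of x within its bit-length field.
-- outside the precondition, e.g. on theGreatXor(-5): A returns 2, B returns 20
import Mathlib
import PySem

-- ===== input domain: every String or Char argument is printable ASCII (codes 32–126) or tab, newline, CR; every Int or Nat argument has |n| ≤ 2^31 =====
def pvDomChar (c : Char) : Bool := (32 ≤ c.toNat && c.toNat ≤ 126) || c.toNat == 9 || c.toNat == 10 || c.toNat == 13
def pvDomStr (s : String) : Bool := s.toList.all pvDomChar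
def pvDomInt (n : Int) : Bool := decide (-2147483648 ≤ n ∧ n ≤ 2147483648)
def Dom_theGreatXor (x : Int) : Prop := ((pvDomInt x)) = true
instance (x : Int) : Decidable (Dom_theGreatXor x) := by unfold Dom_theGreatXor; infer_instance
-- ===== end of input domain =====

-- B replaces A's per-bit loop with the closed form 2^(len(bin(x))-2) - 1 - x (simpler, one expression).


-- ===== PORT A =====
-- helper: the binary digits of a natural number, most significant first (the digits of Python's bin)
def binAux (n : Nat) (acc : List Char) : List Char :=
  if h : n = 0 then acc
  else binAux (n / 2) ((if n % 2 = 1 then '1' else '0') :: acc)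
decreasing_by exact Nat.div_lt_self (Nat.pos_of_ne_zero h) one_lt_two

-- literal port of A: x_bin = list(bin(x)[2:]), then the enumerate loop summing 2**position over '0' bits
def theGreatXor (x : Int) : Int :=
  let x_bin : List Char :=
    if x < 0 then 'b' :: binAux x.natAbs []        -- bin(-n)[2:] = "b" + digits of n
    else if x = 0 then ['0']                       -- bin(0)[2:] = "0"
    else binAux x.toNat []
  let x_len := x_bin.length
  (PySem.List.enumerate x_bin).foldl
    (fun total p =>
      if p.2 = '0' then total + (2 : Int) ^ (((x_len : Int) - p.1 - 1).toNat) else total) 0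

-- ===== PORT B =====
-- helper: the full string bin(x) as a char list
def binFull (x : Int) : List Char :=
  if x < 0 then '-' :: '0' :: 'b' :: binAux x.natAbs []
  else if x = 0 then ['0', 'b', '0']
  else '0' :: 'b' :: binAux x.toNat []

-- literal port of B: 2 ** (len(bin(x)) - 2) - 1 - x
def theGreatXor_alt (x : Int) : Int :=
  (2 : Int) ^ ((binFull x).length - 2) - 1 - x

-- ===== PRECONDITION & SPEC =====
-- Pre_ restricts to the problem's natural domain x ≥ 0 (HackerRank guarantees x ≥ 1): for negative x
-- Python's bin(x) starts with "-0b", and what a slice of that string should mean is unspecified,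
-- so neither program's value there is the function's.
def Pre_theGreatXor (x : Int) : Prop := 0 ≤ x
instance (x : Int) : Decidable (Pre_theGreatXor x) := by unfold Pre_theGreatXor; infer_instance
def pvWitness_theGreatXor : Int := 12
def Spec_theGreatXor (x : Int) (out : Int) : Prop := out = theGreatXor_alt x
instance (x : Int) (out : Int) : Decidable (Spec_theGreatXor x out) := by unfold Spec_theGreatXor; infer_instance

-- ===== CLAIM (what is proved, stated in full; the proofs are below) =====
def Claim_equal_theGreatXor : Prop := ∀ (x : Int), Dom_theGreatXor x → Pre_theGreatXor x → Spec_theGreatXor x (theGreatXor x)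

-- ===== LEMMAS AND PROOFS =====

-- the sum A accumulates over a digit suffix: 2^(number of following digits) for each '0'
def sumZero : List Char → Nat
  | [] => 0
  | c :: cs => (if c = '0' then 2 ^ cs.length else 0) + sumZero cs

-- the value of a digit list, most significant first
def valBin : List Char → Nat
  | [] => 0
  | c :: cs => (if c = '1' then 2 ^ cs.length else 0) + valBin cs

theorem binAux_zero (acc : List Char) : binAux 0 acc = acc := by
  rw [binAux]; simp

theorem binAux_succ (n : Nat) (h : n ≠ 0) (acc : List Char) :
    binAux n acc = binAux (n / 2) ((if n % 2 = 1 then '1' else '0') :: acc) := by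
  rw [binAux]; simp [h]

theorem binAux_eq_append (n : Nat) : ∀ acc, binAux n acc = binAux n [] ++ acc := by
  induction n using Nat.strong_induction_on with
  | _ n ih =>
    intro acc
    by_cases h : n = 0
    · subst h; rw [binAux_zero, binAux_zero]; simp
    · have hlt := Nat.div_lt_self (Nat.pos_of_ne_zero h) one_lt_two
      rw [binAux_succ n h acc, binAux_succ n h [],
          ih (n / 2) hlt ((if n % 2 = 1 then '1' else '0') :: acc),
          ih (n / 2) hlt [if n % 2 = 1 then '1' else '0']]
      simp

theorem binAux_binary (n : Nat) : ∀ c ∈ binAux n [], c = '0' ∨ c = '1' := by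
  induction n using Nat.strong_induction_on with
  | _ n ih =>
    intro c hc
    by_cases h : n = 0
    · subst h; rw [binAux_zero] at hc; simp at hc
    · rw [binAux_succ n h, binAux_eq_append] at hc
      rcases List.mem_append.1 hc with h1 | h1
      · exact ih (n / 2) (Nat.div_lt_self (Nat.pos_of_ne_zero h) one_lt_two) c h1
      · rcases List.mem_singleton.1 h1 with rfl
        by_cases hm : n % 2 = 1 <;> simp [hm]

theorem valBin_append_one (ds : List Char) (c : Char) :
    valBin (ds ++ [c]) = 2 * valBin ds + (if c = '1' then 1 else 0) := by
  induction ds with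
  | nil => simp [valBin]
  | cons d ds ih =>
    simp only [List.cons_append, valBin, ih, List.length_append, List.length_cons,
      List.length_nil, pow_succ]
    split_ifs <;> ring

theorem valBin_binAux (n : Nat) (hn : 0 < n) : valBin (binAux n []) = n := by
  induction n using Nat.strong_induction_on with
  | _ n ih =>
    rw [binAux_succ n (Nat.pos_iff_ne_zero.1 hn), binAux_eq_append]
    by_cases h2 : n / 2 = 0
    · have h1 : n = 1 := by omega
      subst h1
      rw [show (1 : Nat) / 2 = 0 from rfl, binAux_zero]
      decide
    · rw [valBin_append_one,
        ih (n / 2) (Nat.div_lt_self hn one_lt_two) (Nat.pos_of_ne_zero h2)]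
      rcases Nat.mod_two_eq_zero_or_one n with hm | hm <;> simp [hm] <;> omega

theorem sumZero_add_valBin (ds : List Char) (h : ∀ c ∈ ds, c = '0' ∨ c = '1') :
    sumZero ds + valBin ds + 1 = 2 ^ ds.length := by
  induction ds with
  | nil => simp [sumZero, valBin]
  | cons c cs ih =>
    have hc := h c (List.mem_cons_self ..)
    have ihcs := ih (fun d hd => h d (List.mem_cons_of_mem _ hd))
    simp only [sumZero, valBin, List.length_cons, pow_succ]
    rcases hc with rfl | rfl <;> simp <;> omega

-- the enumerate-fold A runs equals sumZero, for any start index and accumulator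
theorem foldl_enum (ds : List Char) : ∀ (L : Nat) (k : Int) (t : Int),
    k + ds.length = L → 0 ≤ k →
    (PySem.List.enumerate ds k).foldl
      (fun total p =>
        if p.2 = '0' then total + (2 : Int) ^ (((L : Int) - p.1 - 1).toNat) else total) t
    = t + (sumZero ds : Int) := by
  induction ds with
  | nil => intro L k t _ _; simp [sumZero]
  | cons c cs ih =>
    intro L k t hL hk
    rw [PySem.List.enumerate_cons]
    simp only [List.foldl_cons, List.length_cons] at *
    have hLk : ((L : Int) - k - 1).toNat = cs.length := by omega
    rw [ih L (k + 1) _ (by omega) (by omega)]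
    simp only [sumZero, hLk]
    split_ifs <;> push_cast <;> ring

-- ===== VERDICT (by name: the statement is the Claim_ definition above) =====
theorem theGreatXor_spec : Claim_equal_theGreatXor := by
  intro x _ hx
  unfold Spec_theGreatXor theGreatXor theGreatXor_alt binFull
  have hneg : ¬ x < 0 := not_lt.2 hx
  by_cases h0 : x = 0
  · subst h0
    decide
  · simp only [hneg, if_false, h0]
    set ds := binAux x.toNat [] with hds
    have hlen : (('0' :: 'b' :: ds).length - 2) = ds.length := by simp
    rw [hlen]
    have hfold := foldl_enum ds ds.length 0 0 (by simp) (by omega)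
    simp only [zero_add] at hfold
    rw [hfold]
    have hval : valBin ds = x.toNat := valBin_binAux x.toNat (by omega)
    have hsum := sumZero_add_valBin ds (binAux_binary x.toNat)
    rw [hval] at hsum
    have hx' : ((x.toNat : Int)) = x := Int.toNat_of_nonneg hx
    have h2 : (sumZero ds : Int) + x + 1 = (2 : Int) ^ ds.length := by
      rw [← hx']; exact_mod_cast hsum
    linarith
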